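-- pv_equiv track=rewrite | github.com/Prajwalsrinvas/quoteflix | scraper.py | create_author_quote_mapping
-- ===== SOURCE A (Python) =====
-- def create_author_quote_mapping(api_response):
--     '''
--     Create a list of quotes for each author, where author name is available
--     '''
--     author_quote_mapping = {}
--     for item in api_response:
--         author = item['author']
--         quote = item['text']
--         if author:
--             if author not in author_quote_mapping:
--                 author_quote_mapping[author] = []
--             author_quote_mapping[author].append(quote)
--     return author_quote_mapping
-- ===== SOURCE B (Python) =====
-- def create_author_quote_mapping(api_response):
--     '''
--     Create a list of quotes for each author, where author name is available
--     '''
--     pairs = [(item['author'], item['text']) for item in api_response]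
--     authors = list(dict.fromkeys(a for a, _ in pairs if a))
--     return {a: [t for x, t in pairs if x == a] for a in authors}
-- ===== Notes on version B (the rewrite author's own statement) =====
-- stated objective: alternative
-- what changed: Replaces A's single-pass mutable-dict bucketing with a declarative decomposition: extract (author,text) pairs, dedup the truthy authors in first-occurrence order (dict.fromkeys), and build the result as a dict comprehension whose value for each author is a per-author filter of the pairs.
import Mathlib
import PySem

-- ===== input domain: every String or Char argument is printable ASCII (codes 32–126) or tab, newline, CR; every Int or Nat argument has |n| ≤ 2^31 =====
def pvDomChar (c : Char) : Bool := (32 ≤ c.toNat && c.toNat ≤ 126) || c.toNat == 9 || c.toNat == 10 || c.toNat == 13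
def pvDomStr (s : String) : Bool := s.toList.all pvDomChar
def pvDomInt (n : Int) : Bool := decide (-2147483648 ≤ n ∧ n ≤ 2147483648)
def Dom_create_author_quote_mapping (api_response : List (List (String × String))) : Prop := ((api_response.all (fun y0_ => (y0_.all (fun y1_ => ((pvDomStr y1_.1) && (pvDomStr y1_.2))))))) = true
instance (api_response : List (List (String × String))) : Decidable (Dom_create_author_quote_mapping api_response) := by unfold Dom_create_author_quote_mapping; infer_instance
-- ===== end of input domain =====

-- B replaces A's single-pass mutable-dict bucketing with a declarative decomposition (pairs, dedup of
-- truthy authors, per-author filter); same result, no speed claim (objective: alternative).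

-- ===== PORT A =====
-- literal transliteration of A: one fold over the items, bucketing into an insertion-ordered dict
def create_author_quote_mapping (api_response : List (List (String × String))) : List (String × List String) :=
  (api_response.foldl
    (fun d item =>
      let author := (List.lookup "author" item).getD ""   -- item['author'] (Pre_ guarantees the key)
      let quote  := (List.lookup "text" item).getD ""     -- item['text']   (Pre_ guarantees the key)
      if author != "" then
        (if d.contains author then d else d.insert author []).modify author [] (fun l => l ++ [quote])
      else d)
    PySem.Dict.empty).items

-- ===== PORT B =====
-- literal transliteration of B: pairs, then dedup of truthy authors, then a per-author filter
def create_author_quote_mapping_alt (api_response : List (List (String × String))) : List (String × List String) :=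
  let pairs := api_response.map (fun item =>
    ((List.lookup "author" item).getD "", (List.lookup "text" item).getD ""))
  let authors := PySem.List.dedup ((pairs.filter (fun p => p.1 != "")).map Prod.fst)
  authors.map (fun a => (a, (pairs.filter (fun p => p.1 == a)).map Prod.snd))

-- ===== PRECONDITION & SPEC =====
-- Pre_ excludes exactly the inputs on which the Python A raises KeyError: some item lacking an
-- 'author' or 'text' key (A reads both keys of every item unconditionally).
def Pre_create_author_quote_mapping (api_response : List (List (String × String))) : Prop :=
  ∀ item ∈ api_response, (List.lookup "author" item).isSome = true ∧ (List.lookup "text" item).isSome = true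
instance (api_response : List (List (String × String))) : Decidable (Pre_create_author_quote_mapping api_response) := by unfold Pre_create_author_quote_mapping; infer_instance

def pvWitness_create_author_quote_mapping : (List (List (String × String))) :=
  [[("author", "Bob"), ("text", "hi")], [("author", ""), ("text", "anon")], [("author", "Bob"), ("text", "bye")]]

def Spec_create_author_quote_mapping (api_response : List (List (String × String))) (out : List (String × List String)) : Prop := out = create_author_quote_mapping_alt api_response
instance (api_response : List (List (String × String))) (out : List (String × List String)) : Decidable (Spec_create_author_quote_mapping api_response out) := by unfold Spec_create_author_quote_mapping; infer_instance

-- ===== CLAIM (what is proved, stated in full; the proofs are below) =====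
def Claim_equal_create_author_quote_mapping : Prop := ∀ (api_response : List (List (String × String))), Dom_create_author_quote_mapping api_response → Pre_create_author_quote_mapping api_response → Spec_create_author_quote_mapping api_response (create_author_quote_mapping api_response)

-- ===== LEMMAS AND PROOFS =====

-- first-match lookup in a literal dict built by appending a fresh key finds that key
theorem pv_get?_mk_append_self {ν : Type} (l : List (String × ν)) (k : String) (x : ν)
    (hk : ∀ p ∈ l, p.1 ≠ k) :
    (PySem.Dict.mk (l ++ [(k, x)])).get? k = some x := by
  induction l with
  | nil => simp [PySem.Dict.get?_mk_cons]
  | cons p t ih =>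
    rw [List.cons_append, PySem.Dict.get?_mk_cons]
    have : p.1 ≠ k := hk p (by simp)
    simp [this]
    exact ih (fun q hq => hk q (by simp [hq]))

-- A's "insert [] if absent, then append" step is the modify-with-default step
theorem pv_insert_modify (d : PySem.Dict String (List String)) (k : String) (v : String) :
    (if d.contains k then d else d.insert k []).modify k [] (fun l => l ++ [v])
      = d.modify k [] (fun l => l ++ [v]) := by
  by_cases h : d.contains k
  · simp [h]
  · have h' : d.contains k = false := by simpa using h
    have hk : ∀ p ∈ d.items, p.1 ≠ k := by
      intro p hp hpk
      have hm : k ∈ d.keys := hpk ▸ PySem.Dict.mem_keys_of_mem_items d hp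
      rw [← PySem.Dict.contains_iff_mem_keys] at hm
      simp [hm] at h'
    have h2 : (PySem.Dict.mk (d.items ++ [(k, ([] : List String))])).getD k [] = [] := by
      rw [PySem.Dict.getD_eq_get?_getD, pv_get?_mk_append_self _ _ _ hk]
      rfl
    simp [PySem.Dict.insert, PySem.Dict.modify, h', h2, PySem.Dict.getD_of_not_contains d _ h']
    have := List.map_congr_left (l := d.items)
      (f := fun p : String × List String => if p.1 = k then (k, [v]) else p) (g := id)
      (fun p hp => by simp [hk p hp])
    simpa using this

-- a list whose second components are determined by the first is a map over its first components
theorem pv_eq_map_fst {α β : Type} (l : List (α × β)) (g : α → β)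
    (h : ∀ p ∈ l, p.2 = g p.1) :
    l = (l.map Prod.fst).map (fun k => (k, g k)) := by
  induction l with
  | nil => rfl
  | cons p t ih =>
    have hp : p.2 = g p.1 := h p (by simp)
    obtain ⟨k, v⟩ := p
    simp only [List.map_cons]
    rw [← ih (fun q hq => h q (by simp [hq]))]
    simp only at hp
    rw [hp]

-- the dict built by A's loop over the truthy pairs, read out as an items list
theorem pv_items_group (tp : List (String × String)) :
    (tp.foldl (fun d p => d.modify p.1 [] (fun l => l ++ [p.2])) PySem.Dict.empty).items
      = (PySem.Set.ofList (tp.map Prod.fst)).map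
          (fun a => (a, (tp.filter (fun p => p.1 == a)).map Prod.snd)) := by
  set D := tp.foldl (fun d p => d.modify p.1 [] (fun l => l ++ [p.2])) PySem.Dict.empty with hD
  have hkeys : D.keys = PySem.Set.ofList (tp.map Prod.fst) := by
    rw [hD, PySem.Dict.keys_foldl_modify_key tp Prod.fst [] (fun _ p l => l ++ [p.2])]
    simp [PySem.Dict.keys_empty]
    rfl
  have hnodup : D.keys.Nodup := by
    rw [hD]
    exact PySem.Dict.nodup_keys_foldl_modify_key tp Prod.fst [] (fun _ p l => l ++ [p.2])
      PySem.Dict.empty (by simp [PySem.Dict.keys_empty])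
  have hgetD : ∀ a, D.getD a [] = (tp.filter (fun p => p.1 == a)).map Prod.snd := by
    intro a
    rw [hD, PySem.Dict.getD_foldl_modify_append tp PySem.Dict.empty a]
    simp [PySem.Dict.getD_empty]
  have hval : ∀ p ∈ D.items, p.2 = D.getD p.1 [] := by
    intro p hp
    exact (PySem.Dict.getD_of_mem_items D (k := p.1) (v := p.2) hp hnodup []).symm
  have hfst : D.items.map Prod.fst = D.keys := by
    conv_rhs => rw [show D = PySem.Dict.mk D.items from rfl]
    rw [PySem.Dict.keys_mk]
  calc D.items = (D.items.map Prod.fst).map (fun k => (k, D.getD k [])) := pv_eq_map_fst _ _ hval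
    _ = (PySem.Set.ofList (tp.map Prod.fst)).map (fun k => (k, D.getD k [])) := by rw [hfst, hkeys]
    _ = _ := List.map_congr_left (fun a _ => by rw [hgetD a])

-- ===== VERDICT (by name: the statement is the Claim_ definition above) =====
theorem create_author_quote_mapping_spec : Claim_equal_create_author_quote_mapping := by
  intro api _ _
  unfold Spec_create_author_quote_mapping create_author_quote_mapping
  set pairs := api.map (fun item : List (String × String) =>
    ((List.lookup "author" item).getD "", (List.lookup "text" item).getD "")) with hpairs
  have halt : create_author_quote_mapping_alt api
      = (PySem.List.dedup ((pairs.filter (fun p => p.1 != "")).map Prod.fst)).map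
          (fun a => (a, (pairs.filter (fun p => p.1 == a)).map Prod.snd)) := rfl
  -- A's fold over items is a fold over the extracted pairs
  have h1 : (api.foldl
      (fun d item =>
        let author := (List.lookup "author" item).getD ""
        let quote  := (List.lookup "text" item).getD ""
        if author != "" then
          (if d.contains author then d else d.insert author []).modify author [] (fun l => l ++ [quote])
        else d)
      PySem.Dict.empty)
      = pairs.foldl
        (fun d p =>
          if p.1 != "" then
            (if d.contains p.1 then d else d.insert p.1 []).modify p.1 [] (fun l => l ++ [p.2])
          else d)
        PySem.Dict.empty := by
    rw [hpairs, List.foldl_map]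
  -- merge the insert-then-append into one modify step
  have h2 : (fun (d : PySem.Dict String (List String)) (p : String × String) =>
      if p.1 != "" then
        (if d.contains p.1 then d else d.insert p.1 []).modify p.1 [] (fun l => l ++ [p.2])
      else d)
      = fun d p => if (fun q : String × String => q.1 != "") p then d.modify p.1 [] (fun l => l ++ [p.2]) else d := by
    funext d p
    by_cases hp : p.1 != ""
    · simp only [hp, if_true]
      exact pv_insert_modify d p.1 p.2
    · simp [hp]
  set tp := pairs.filter (fun q => q.1 != "") with htp
  have hded : PySem.List.dedup ((pairs.filter (fun p => p.1 != "")).map Prod.fst)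
      = PySem.Set.ofList (tp.map Prod.fst) := by
    rw [htp]; simp
  rw [halt, hded, h1, h2, ← List.foldl_filter, ← htp, pv_items_group tp]
  refine List.map_congr_left (fun a ha => ?_)
  -- a is a truthy author, so filtering the truthy pairs equals filtering all pairs
  have ha' : a ≠ "" := by
    obtain ⟨p, hp, rfl⟩ := List.mem_map.mp ((PySem.Set.mem_ofList (tp.map Prod.fst) a).mp ha)
    rw [htp] at hp
    simpa using (List.mem_filter.mp hp).2
  have hff : tp.filter (fun p => p.1 == a) = pairs.filter (fun p => p.1 == a) := by
    rw [htp, List.filter_filter]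
    refine List.filter_congr (fun p _ => ?_)
    by_cases hpa : p.1 = a
    · subst hpa; simp [ha']
    · simp [hpa]
  rw [hff]
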